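-- pv_equiv track=rewrite | github.com/Aamir7693/Opti-Q | src/llm_dag_optimizer/structures/dag.py | canonical_mask_and_permutation
-- ===== SOURCE A (Python) =====
-- import itertools
-- from typing import List, Tuple
--
-- def canonical_mask_and_permutation(adj_matrix, k: int) -> Tuple[int, Tuple]:
--     """
--     Find canonical (highest-value) bitmask representation and the permutation.
--
--     Returns:
--         (best_mask, best_perm) where best_perm[new_pos] = old_node_id
--     """
--     nodes = list(range(k))
--     best_mask = -1
--     best_perm = None
--
--     for perm in itertools.permutations(nodes):
--         pos = {node: idx for idx, node in enumerate(perm)}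
--         valid = True
--         for i in range(k):
--             for j in range(k):
--                 if adj_matrix[i][j] == 1 and pos[i] > pos[j]:
--                     valid = False
--                     break
--             if not valid:
--                 break
--         if not valid:
--             continue
--
--         new_mask = 0
--         bit_index = 0
--         for a in range(k - 1):
--             for b in range(a + 1, k):
--                 x, y = perm[a], perm[b]
--                 if adj_matrix[x][y] == 1:
--                     new_mask |= (1 << bit_index)
--                 bit_index += 1
--
--         if new_mask > best_mask:
--             best_mask = new_mask
--             best_perm = perm
--
--     return best_mask, best_perm
-- ===== SOURCE B (Python) =====
-- def canonical_mask_and_permutation(adj_matrix, k):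
--     """Backtracking over topological orderings only: at each depth try the
--     not-yet-placed nodes in ascending id order, keeping a node only if none of
--     its predecessors is still unplaced; strict '>' keeps the lexicographically
--     first ordering among equal maximal masks."""
--     preds = [[i for i in range(k) if i != j and adj_matrix[i][j] == 1]
--              for j in range(k)]
--
--     def pair_mask(perm):
--         mask = 0
--         bit = 0
--         for a in range(k - 1):
--             for b in range(a + 1, k):
--                 if adj_matrix[perm[a]][perm[b]] == 1:
--                     mask |= 1 << bit
--                 bit += 1
--         return mask
--
--     best = (-1, None)
--
--     def extend(placed, remaining):
--         nonlocal best
--         if not remaining: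
--             m = pair_mask(placed)
--             if m > best[0]:
--                 best = (m, tuple(placed))
--             return
--         for x in remaining:
--             if all(p not in remaining for p in preds[x]):
--                 extend(placed + [x], [y for y in remaining if y != x])
--
--     extend([], list(range(k)))
--     return best
-- ===== Notes on version B (the rewrite author's own statement) =====
-- stated objective: faster
-- what changed: Instead of generating all k! permutations and filtering each with an O(k^2) validity check, B precomputes each node's predecessor list and backtracks, extending only prefixes whose every placed node already has all its predecessors placed, so it enumerates exactly the topological orderings (in the same lexicographic order, with the same strict '>' update).
-- outside the precondition, e.g. on canonical_mask_and_permutation([[0, 1], [1]], 2): A returns (-1, None), B returns (-1, None); on canonical_mask_and_permutation([[0, 0], [0]], 2): A raises IndexError, B returns (0, (0, 1))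
import Mathlib
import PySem

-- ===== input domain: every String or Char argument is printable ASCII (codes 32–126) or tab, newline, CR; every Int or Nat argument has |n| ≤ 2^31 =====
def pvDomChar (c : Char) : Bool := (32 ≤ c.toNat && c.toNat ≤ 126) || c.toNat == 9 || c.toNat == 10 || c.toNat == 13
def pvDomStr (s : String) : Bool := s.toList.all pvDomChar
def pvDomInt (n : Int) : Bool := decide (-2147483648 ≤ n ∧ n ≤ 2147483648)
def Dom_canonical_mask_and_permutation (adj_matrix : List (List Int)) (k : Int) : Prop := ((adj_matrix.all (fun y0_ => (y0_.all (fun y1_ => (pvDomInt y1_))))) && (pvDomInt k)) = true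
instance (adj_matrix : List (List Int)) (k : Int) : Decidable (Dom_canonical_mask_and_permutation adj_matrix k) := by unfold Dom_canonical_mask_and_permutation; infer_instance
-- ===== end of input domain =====

-- B replaces A's filter over all k! permutations by predecessor-pruned backtracking that
-- enumerates only the topological orderings (same candidate order, same strict-'>' update,
-- hence the same mask and permutation); equality of return values is proved on Pre_.

-- ===== PORT A =====
-- adj_matrix[i][j] (the same indexing both Pythons perform; default 0 makes it total, exact under Pre_)
def pvAdj (adj_matrix : List (List Int)) (i j : Int) : Int :=
  PySem.List.pyGetD (PySem.List.pyGetD adj_matrix i []) j 0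

-- the pair-bitmask double loop (this exact code appears in Source A and as `pair_mask` in Source B);
-- state = (new_mask, bit_index)
def pvMask (adj_matrix : List (List Int)) (k : Int) (perm : List Int) : Int × Int :=
  (PySem.List.pyRange 0 (k-1) 1).foldl (fun st a =>
    (PySem.List.pyRange (a+1) k 1).foldl (fun st b =>
      let x := PySem.List.pyGetD perm a 0
      let y := PySem.List.pyGetD perm b 0
      ((if pvAdj adj_matrix x y == 1 then Int.lor st.1 ((1:Int) <<< st.2.toNat) else st.1),
       st.2 + 1)) st) ((0:Int), (0:Int))

-- pos = {node: idx for idx, node in enumerate(perm)}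
def pvPosDict (perm : List Int) : PySem.Dict Int Int :=
  (PySem.List.enumerate perm 0).foldl (fun d p => d.insert p.2 p.1) PySem.Dict.empty

-- the validity double loop of Source A (`break` = short-circuit of `all`)
def pvValidA (adj_matrix : List (List Int)) (k : Int) (pos : PySem.Dict Int Int) : Bool :=
  (PySem.List.pyRange 0 k 1).all (fun i =>
    (PySem.List.pyRange 0 k 1).all (fun j =>
      !(pvAdj adj_matrix i j == 1 && decide (pos.getD j 0 < pos.getD i 0))))

-- itertools.permutations(nodes): lexicographic enumeration (each element in turn as head)
def pvPerms (l : List Int) : List (List Int) :=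
  if h : l = [] then [[]]
  else l.attach.flatMap (fun x => (pvPerms (l.erase x.1)).map (x.1 :: ·))
termination_by l.length
decreasing_by
  have hm := List.length_erase_of_mem x.2
  have : l.length ≠ 0 := by simpa [List.length_eq_zero_iff] using h
  omega

def canonical_mask_and_permutation (adj_matrix : List (List Int)) (k : Int) : Int × Option (List Int) :=
  let nodes := PySem.List.pyRange 0 k 1
  (pvPerms nodes).foldl (fun best perm =>
    if pvValidA adj_matrix k (pvPosDict perm) then
      let m := (pvMask adj_matrix k perm).1
      if m > best.1 then (m, some perm) else best
    else best) (-1, none)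

-- ===== PORT B =====
-- preds[j] = [i for i in range(k) if i != j and adj_matrix[i][j] == 1]
def pvPreds (adj_matrix : List (List Int)) (k : Int) : List (List Int) :=
  (PySem.List.pyRange 0 k 1).map (fun j =>
    (PySem.List.pyRange 0 k 1).filter (fun i => i != j && pvAdj adj_matrix i j == 1))

-- the recursive `extend(placed, remaining)` of Source B; `best` threaded as an accumulator
def pvExtend (adj_matrix : List (List Int)) (k : Int) (preds : List (List Int))
    (placed remaining : List Int) (best : Int × Option (List Int)) : Int × Option (List Int) :=
  if remaining = [] then
    let m := (pvMask adj_matrix k placed).1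
    if m > best.1 then (m, some placed) else best
  else
    remaining.attach.foldl (fun best x =>
      if (PySem.List.pyGetD preds x.1 []).all (fun p => !remaining.contains p) then
        pvExtend adj_matrix k preds (placed ++ [x.1]) (remaining.filter (fun y => y != x.1)) best
      else best) best
termination_by remaining.length
decreasing_by
  have hlen := @List.length_filter_lt_length_iff_exists _
    (fun (y : {y // y ∈ remaining}) => (y : Int) != x.1) remaining.attach
  rw [List.length_unattach]
  exact (List.length_attach (l := remaining)) ▸ hlen.mpr ⟨x, List.mem_attach _ _, by simp⟩

def canonical_mask_and_permutation_alt (adj_matrix : List (List Int)) (k : Int) : Int × Option (List Int) :=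
  pvExtend adj_matrix k (pvPreds adj_matrix k) [] (PySem.List.pyRange 0 k 1) (-1, none)

-- ===== PRECONDITION & SPEC =====
-- Pre_ excludes ragged/short matrices: both programs index adj_matrix[i][j] for i, j < k and
-- in general raise IndexError there (an early `break` occasionally lets A return anyway).
def Pre_canonical_mask_and_permutation (adj_matrix : List (List Int)) (k : Int) : Prop :=
  k ≤ 0 ∨ (k ≤ (adj_matrix.length : Int) ∧ ∀ row ∈ adj_matrix.take k.toNat, k ≤ (row.length : Int))
instance (adj_matrix : List (List Int)) (k : Int) : Decidable (Pre_canonical_mask_and_permutation adj_matrix k) := by unfold Pre_canonical_mask_and_permutation; infer_instance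

def pvWitness_canonical_mask_and_permutation : List (List Int) × Int := ([[0, 1], [0, 0]], 2)

def Spec_canonical_mask_and_permutation (adj_matrix : List (List Int)) (k : Int) (out : Int × Option (List Int)) : Prop := out = canonical_mask_and_permutation_alt adj_matrix k
instance (adj_matrix : List (List Int)) (k : Int) (out : Int × Option (List Int)) : Decidable (Spec_canonical_mask_and_permutation adj_matrix k out) := by unfold Spec_canonical_mask_and_permutation; infer_instance

-- ===== CLAIM (what is proved, stated in full; the proofs are below) =====
def Claim_equal_canonical_mask_and_permutation : Prop := ∀ (adj_matrix : List (List Int)) (k : Int), Dom_canonical_mask_and_permutation adj_matrix k → Pre_canonical_mask_and_permutation adj_matrix k → Spec_canonical_mask_and_permutation adj_matrix k (canonical_mask_and_permutation adj_matrix k)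

-- ===== LEMMAS AND PROOFS =====

-- the shared update step: compare the pair-mask with the running best (strict '>')
def pvUpd (adj_matrix : List (List Int)) (k : Int) (best : Int × Option (List Int))
    (perm : List Int) : Int × Option (List Int) :=
  let m := (pvMask adj_matrix k perm).1
  if m > best.1 then (m, some perm) else best

-- B's pruning test at one node
def pvOk (preds : List (List Int)) (remaining : List Int) (x : Int) : Bool :=
  (PySem.List.pyGetD preds x []).all (fun p => !remaining.contains p)

-- the list of full orderings B's backtracking visits, in visiting order
def pvTopos (preds : List (List Int)) (rem : List Int) : List (List Int) :=
  if h : rem = [] then [[]]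
  else rem.attach.flatMap (fun x =>
    if pvOk preds rem x.1 then
      (pvTopos preds (rem.filter (fun y => y != x.1))).map (x.1 :: ·) else [])
termination_by rem.length
decreasing_by
  have hlen := @List.length_filter_lt_length_iff_exists _
    (fun (y : {y // y ∈ rem}) => (y : Int) != x.1) rem.attach
  rw [List.length_unattach]
  exact (List.length_attach (l := rem)) ▸ hlen.mpr ⟨x, List.mem_attach _ _, by simp⟩

-- stepwise acceptance of a full sequence by B's pruning
def pvW (preds : List (List Int)) : List Int → List Int → Bool
  | _, [] => true
  | rem, x :: σ => pvOk preds rem x && pvW preds (rem.filter (fun y => y != x)) σ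

theorem mem_pvPerms_aux (n : Nat) : ∀ (rem σ : List Int), rem.length ≤ n →
    σ ∈ pvPerms rem → σ.Perm rem := by
  induction n with
  | zero =>
    intro rem σ hle h
    have hr : rem = [] := List.length_eq_zero_iff.mp (Nat.le_zero.mp hle)
    subst hr
    rw [pvPerms] at h
    simp at h
    simp [h]
  | succ n ih =>
    intro rem σ hle h
    rw [pvPerms] at h
    by_cases hr : rem = []
    · subst hr; simp at h; simp [h]
    · rw [dif_neg hr] at h
      simp only [List.mem_flatMap, List.mem_map, List.mem_attach, true_and] at h
      obtain ⟨x, σ', hσ', rfl⟩ := h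
      have hne : rem.length ≠ 0 := by simpa [List.length_eq_zero_iff] using hr
      have hlt : (rem.erase x.1).length ≤ n := by
        have := List.length_erase_of_mem x.2
        omega
      have hperm := ih (rem.erase x.1) σ' hlt hσ'
      exact (hperm.cons x.1).trans (List.perm_cons_erase x.2).symm

theorem mem_pvPerms {σ rem : List Int} (h : σ ∈ pvPerms rem) : σ.Perm rem :=
  mem_pvPerms_aux rem.length rem σ le_rfl h

theorem pvExtend_eq (adj_matrix : List (List Int)) (k : Int) (preds : List (List Int))
    (rem placed : List Int) (best : Int × Option (List Int)) :
    pvExtend adj_matrix k preds placed rem best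
      = (pvTopos preds rem).foldl (fun b σ => pvUpd adj_matrix k b (placed ++ σ)) best := by
  induction hn : rem.length using Nat.strong_induction_on generalizing rem placed best with
  | _ n ih =>
  subst hn
  rw [pvExtend, pvTopos]
  by_cases hr : rem = []
  · subst hr
    simp [pvUpd]
  · rw [if_neg hr, dif_neg hr, List.foldl_flatMap]
    apply PySem.List.foldl_congr_mem
    intro acc x hx
    by_cases hok : pvOk preds rem x.1
    · rw [if_pos (by simpa [pvOk] using hok), if_pos hok, List.foldl_map]
      have hlt : (rem.filter (fun y => y != x.1)).length < rem.length :=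
        List.length_filter_lt_length_iff_exists.mpr ⟨x.1, x.2, by simp⟩
      rw [ih _ hlt _ _ _ rfl]
      apply PySem.List.foldl_congr_mem
      intro acc' σ' _
      have : placed ++ x.1 :: σ' = (placed ++ [x.1]) ++ σ' := by
        rw [List.append_cons]
      rw [this]
    · rw [if_neg (by simpa [pvOk] using hok), if_neg hok]
      simp

theorem pvTopos_eq_filter (preds : List (List Int)) (rem : List Int) (hnd : rem.Nodup) :
    pvTopos preds rem = (pvPerms rem).filter (pvW preds rem) := by
  induction hn : rem.length using Nat.strong_induction_on generalizing rem with
  | _ n ih =>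
  subst hn
  rw [pvTopos, pvPerms]
  by_cases hr : rem = []
  · subst hr
    simp [pvW]
  · rw [dif_neg hr, dif_neg hr, List.filter_flatMap]
    apply List.flatMap_congr
    intro x hx
    rw [List.filter_map]
    have hstep : ∀ σ : List Int, pvW preds rem (x.1 :: σ)
        = (pvOk preds rem x.1 && pvW preds (rem.filter (fun y => y != x.1)) σ) := fun σ => rfl
    by_cases hok : pvOk preds rem x.1
    · rw [if_pos hok]
      have hfe : rem.erase x.1 = rem.filter (fun y => y != x.1) :=
        List.Nodup.erase_eq_filter hnd x.1
      have hlt : (rem.filter (fun y => y != x.1)).length < rem.length :=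
        List.length_filter_lt_length_iff_exists.mpr ⟨x.1, x.2, by simp⟩
      have hnd' : (rem.filter (fun y => y != x.1)).Nodup := List.Nodup.filter _ hnd
      rw [hfe, ih _ hlt _ hnd' rfl]
      congr 1
      apply List.filter_congr
      intro σ hσ
      simp [Function.comp, hstep σ, hok]
    · rw [if_neg hok]
      have : (List.filter (pvW preds rem ∘ fun σ => x.1 :: σ) (pvPerms (rem.erase x.1))) = [] := by
        apply List.filter_eq_nil_iff.mpr
        intro σ hσ
        simp [Function.comp, hstep σ, hok]
      rw [this, List.map_nil]

theorem pvPos_aux (σ : List Int) : ∀ (s : Int) (d : PySem.Dict Int Int) (i : Int), σ.Nodup →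
    ((PySem.List.enumerate σ s).foldl (fun d p => d.insert p.2 p.1) d).get? i
      = if i ∈ σ then some (s + (List.idxOf i σ : Int)) else d.get? i := by
  induction σ with
  | nil => intro s d i _; simp [PySem.List.enumerate_nil]
  | cons x t ih =>
    intro s d i hnd
    rw [PySem.List.enumerate_cons]
    simp only [List.foldl_cons]
    rw [ih (s + 1) (d.insert x s) i (List.Nodup.of_cons hnd)]
    by_cases hit : i ∈ t
    · have hne : x ≠ i := by
        rintro rfl
        exact (List.nodup_cons.mp hnd).1 hit
      rw [if_pos hit, if_pos (List.mem_cons_of_mem _ hit), List.idxOf_cons_ne t hne]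
      push_cast
      ring_nf
    · rw [if_neg hit]
      by_cases hix : i = x
      · subst hix
        rw [if_pos (List.mem_cons_self), List.idxOf_cons_self,
          PySem.Dict.get?_insert_self]
        norm_num
      · rw [if_neg (by simp [hix, hit]), PySem.Dict.get?_insert_of_ne d s hix]

theorem pvPosDict_getD {σ : List Int} (hnd : σ.Nodup) {i : Int} (hi : i ∈ σ) :
    (pvPosDict σ).getD i 0 = (σ.idxOf i : Int) := by
  show ((pvPosDict σ).get? i).getD 0 = _
  unfold pvPosDict
  rw [pvPos_aux σ 0 PySem.Dict.empty i hnd, if_pos hi]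
  simp

theorem pvValidA_iff (adj_matrix : List (List Int)) (k : Int) {σ : List Int}
    (hp : σ.Perm (PySem.List.pyRange 0 k 1)) :
    pvValidA adj_matrix k (pvPosDict σ) = true ↔
      σ.Pairwise (fun a b => pvAdj adj_matrix b a ≠ 1) := by
  have hndσ : σ.Nodup := hp.nodup_iff.mpr (PySem.List.nodup_pyRange_one 0 k)
  have hkey : pvValidA adj_matrix k (pvPosDict σ) = true ↔
      ∀ i ∈ σ, ∀ j ∈ σ,
        ¬(pvAdj adj_matrix i j = 1 ∧ (List.idxOf j σ : Int) < (List.idxOf i σ : Int)) := by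
    simp only [pvValidA, List.all_eq_true]
    constructor
    · intro hv i hi j hj
      have h := hv i (hp.mem_iff.mp hi) j (hp.mem_iff.mp hj)
      rw [pvPosDict_getD hndσ hj, pvPosDict_getD hndσ hi] at h
      simp at h
      intro hcon
      rcases h with h1 | h1
      · exact h1 hcon.1
      · exact absurd hcon.2 (not_lt.mpr (by exact_mod_cast h1))
    · intro hv i hi j hj
      have hiσ := hp.mem_iff.mpr hi
      have hjσ := hp.mem_iff.mpr hj
      have h := hv i hiσ j hjσ
      rw [pvPosDict_getD hndσ hjσ, pvPosDict_getD hndσ hiσ]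
      simp
      by_cases hadj : pvAdj adj_matrix i j = 1
      · exact Or.inr (by exact_mod_cast not_lt.mp (fun hb => h ⟨hadj, hb⟩))
      · exact Or.inl hadj
  rw [hkey, List.pairwise_iff_getElem]
  constructor
  · intro hv p q hpl hql hpq hadj
    have h1 : σ[q] ∈ σ := List.getElem_mem _
    have h2 : σ[p] ∈ σ := List.getElem_mem _
    refine hv σ[q] h1 σ[p] h2 ⟨hadj, ?_⟩
    rw [List.Nodup.idxOf_getElem hndσ p hpl, List.Nodup.idxOf_getElem hndσ q hql]
    exact_mod_cast hpq
  · rintro hpw i hi j hj ⟨hadj, hlt⟩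
    have hjl : List.idxOf j σ < σ.length := List.idxOf_lt_length_iff.mpr hj
    have hil : List.idxOf i σ < σ.length := List.idxOf_lt_length_iff.mpr hi
    have hltn : List.idxOf j σ < List.idxOf i σ := by exact_mod_cast hlt
    have h := hpw (List.idxOf j σ) (List.idxOf i σ) hjl hil hltn
    rw [List.getElem_idxOf hjl, List.getElem_idxOf hil] at h
    exact h hadj

theorem pvW_iff (adj_matrix : List (List Int)) (k : Int) {σ rem : List Int}
    (hp : σ.Perm rem) (hnd : rem.Nodup) (hsub : ∀ x ∈ rem, 0 ≤ x ∧ x < k) :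
    pvW (pvPreds adj_matrix k) rem σ = true ↔
      σ.Pairwise (fun a b => pvAdj adj_matrix b a ≠ 1) := by
  induction σ generalizing rem with
  | nil => simp [pvW]
  | cons x t ih =>
    have hndσ : (x :: t).Nodup := hp.nodup_iff.mpr hnd
    have hxt : x ∉ t := (List.nodup_cons.mp hndσ).1
    have hx : x ∈ rem := hp.subset List.mem_cons_self
    obtain ⟨hx0, hxk⟩ := hsub x hx
    have h2 : (x :: t).filter (fun y => y != x) = t := by
      rw [List.filter_cons_of_neg (by simp)]
      exact List.filter_eq_self.mpr (fun a ha => by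
        simp only [bne_iff_ne, ne_eq]
        rintro rfl
        exact hxt ha)
    have hrem' : t.Perm (rem.filter (fun y => y != x)) := by
      have h1 := List.Perm.filter (fun y => y != x) hp
      rw [h2] at h1
      exact h1
    have hok : pvOk (pvPreds adj_matrix k) rem x = true ↔
        ∀ p ∈ t, pvAdj adj_matrix p x ≠ 1 := by
      unfold pvOk pvPreds
      rw [PySem.List.pyGetD_map_pyRange_of_nonneg
        (fun j => (PySem.List.pyRange 0 k 1).filter
          (fun i => i != j && pvAdj adj_matrix i j == 1)) k x [] hx0 hxk]
      simp only [List.all_eq_true, List.mem_filter, Bool.and_eq_true, bne_iff_ne, beq_iff_eq,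
        PySem.List.mem_pyRange_one, Bool.not_eq_eq_eq_not, Bool.not_true,
        List.contains_eq_mem, decide_eq_false_iff_not, ne_eq]
      constructor
      · intro hall p hpt hadj
        have hpr : p ∈ rem := hp.subset (List.mem_cons_of_mem _ hpt)
        obtain ⟨hp0, hpk⟩ := hsub p hpr
        have hpx : ¬ p = x := by rintro rfl; exact hxt hpt
        exact hall p ⟨⟨hp0, hpk⟩, hpx, hadj⟩ hpr
      · rintro hno p ⟨⟨hp0, hpk⟩, hpx, hadj⟩ hpr
        rcases List.mem_cons.mp (hp.mem_iff.mpr hpr) with h | hpt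
        · exact hpx h
        · exact hno p hpt hadj
    have hsub' : ∀ y ∈ rem.filter (fun y => y != x), 0 ≤ y ∧ y < k :=
      fun y hy => hsub y (List.mem_of_mem_filter hy)
    have hnd' := List.Nodup.filter (fun y => y != x) hnd
    have hW : pvW (pvPreds adj_matrix k) rem (x :: t)
        = (pvOk (pvPreds adj_matrix k) rem x
            && pvW (pvPreds adj_matrix k) (rem.filter (fun y => y != x)) t) := rfl
    rw [hW, Bool.and_eq_true, List.pairwise_cons, hok, ih hrem' hnd' hsub']

-- ===== VERDICT (by name: the statement is the Claim_ definition above) =====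
theorem canonical_mask_and_permutation_spec : Claim_equal_canonical_mask_and_permutation := by
  intro adj k _hDom _hPre
  unfold Spec_canonical_mask_and_permutation
  unfold canonical_mask_and_permutation canonical_mask_and_permutation_alt
  rw [pvExtend_eq]
  rw [pvTopos_eq_filter _ _ (PySem.List.nodup_pyRange_one 0 k)]
  have hA : ((pvPerms (PySem.List.pyRange 0 k 1)).foldl (fun best perm =>
      if pvValidA adj k (pvPosDict perm) then
        let m := (pvMask adj k perm).1
        if m > best.1 then (m, some perm) else best
      else best) ((-1 : Int), (none : Option (List Int))))
      = ((pvPerms (PySem.List.pyRange 0 k 1)).filter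
          (fun perm => pvValidA adj k (pvPosDict perm))).foldl
          (fun b σ => pvUpd adj k b σ) (-1, none) := by
    rw [← PySem.List.foldl_if_eq_foldl_filter (fun perm => pvValidA adj k (pvPosDict perm))
      (fun b σ => pvUpd adj k b σ)]
    rfl
  simp only []
  rw [hA]
  have hfilter : (pvPerms (PySem.List.pyRange 0 k 1)).filter
      (fun perm => pvValidA adj k (pvPosDict perm))
      = (pvPerms (PySem.List.pyRange 0 k 1)).filter
          (pvW (pvPreds adj k) (PySem.List.pyRange 0 k 1)) := by
    apply List.filter_congr
    intro σ hσ
    have hperm := mem_pvPerms hσ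
    rw [Bool.eq_iff_iff, pvValidA_iff adj k hperm,
      pvW_iff adj k hperm (PySem.List.nodup_pyRange_one 0 k)
        (fun x hx => by simpa using (PySem.List.mem_pyRange_one.mp hx))]
  rw [hfilter]
  apply PySem.List.foldl_congr_mem
  intro acc x _
  simp [pvUpd]
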